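-- pv_equiv track=rewrite | github.com/markusleb/octatonic | octatonic.py | generate_U_L
-- ===== SOURCE A (Python) =====
-- def generate_U_L(A):
--     U = ['0'] * len(A)
--     L = ['0'] * len(A)
--     u_assigned = False  # Flag to track if U has been assigned a 1
--
--     for i in range(len(A)):
--         if A[i] == '1':
--             if not u_assigned:
--                 U[i] = '1'
--                 u_assigned = True
--             else:
--                 L[i] = '1'
--                 u_assigned = False  # Reset for next 1
--
--     return ''.join(U), ''.join(L)
-- ===== SOURCE B (Python) =====
-- def generate_U_L(A):
--     # Two-phase: collect positions of '1', then paint the even-ranked ones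
--     # into U and the odd-ranked ones into L by stride-2 slicing; no toggle flag.
--     ones = [i for i, c in enumerate(A) if c == '1']
--     uidx = ones[0::2]
--     lidx = ones[1::2]
--     U = ''.join('1' if i in uidx else '0' for i in range(len(A)))
--     L = ''.join('1' if i in lidx else '0' for i in range(len(A)))
--     return U, L
-- ===== Notes on version B (the rewrite author's own statement) =====
-- stated objective: alternative
-- what changed: Replaces A's single stateful pass with a toggle flag by a two-phase scheme: first collect the indices of '1' characters, then build U from the even-ranked indices (stride-2 slice) and L from the odd-ranked ones by membership over range(len(A)).
import Mathlib
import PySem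

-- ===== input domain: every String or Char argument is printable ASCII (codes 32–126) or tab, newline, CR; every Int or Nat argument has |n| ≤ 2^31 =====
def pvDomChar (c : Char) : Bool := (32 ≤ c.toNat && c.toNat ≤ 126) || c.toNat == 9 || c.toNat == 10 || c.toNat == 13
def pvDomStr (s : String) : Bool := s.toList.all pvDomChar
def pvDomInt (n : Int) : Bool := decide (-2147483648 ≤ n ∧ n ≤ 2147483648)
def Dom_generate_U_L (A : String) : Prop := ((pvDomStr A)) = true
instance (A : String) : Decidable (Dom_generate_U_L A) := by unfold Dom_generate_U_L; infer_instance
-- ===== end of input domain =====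

-- B replaces A's one-pass toggle-flag loop with a two-phase scheme: collect the
-- indices of '1', split them by rank parity with a stride-2 slice, then paint
-- each output by index membership (objective: alternative decomposition).

-- ===== PORT A =====
-- A's loop body: writes position i of U/L and updates the flag.
def pvAStep (st : List Char × List Char × Bool) (c : Char) : List Char × List Char × Bool :=
  if c = '1' then
    if st.2.2 = false then (st.1 ++ ['1'], st.2.1 ++ ['0'], true)
    else (st.1 ++ ['0'], st.2.1 ++ ['1'], false)
  else (st.1 ++ ['0'], st.2.1 ++ ['0'], st.2.2)

def generate_U_L (A : String) : String × String :=
  let r := A.toList.foldl pvAStep ([], [], false)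
  (String.ofList r.1, String.ofList r.2.1)

-- ===== PORT B =====
-- [i for i, c in enumerate(A) if c == '1']
def pvOnes (cs : List Char) : List Int :=
  ((PySem.List.enumerate cs).filter (fun p => p.2 == '1')).map Prod.fst

-- xs[0::2]: every second element starting at position 0 (hand port of the
-- step-2 slice; exact for a step-2 slice of a list starting at 0).
def pvEveryOther : List Int → List Int
  | [] => []
  | [a] => [a]
  | a :: _ :: rest => a :: pvEveryOther rest

def generate_U_L_alt (A : String) : String × String :=
  let ones := pvOnes A.toList
  let uidx := pvEveryOther ones            -- ones[0::2]
  let lidx := pvEveryOther ones.tail       -- ones[1::2]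
  (String.ofList ((PySem.List.pyRange 0 (PySem.Str.len A) 1).map
      (fun i => if i ∈ uidx then '1' else '0')),
   String.ofList ((PySem.List.pyRange 0 (PySem.Str.len A) 1).map
      (fun i => if i ∈ lidx then '1' else '0')))

-- ===== PRECONDITION & SPEC =====
def Spec_generate_U_L (A : String) (out : String × String) : Prop := out = generate_U_L_alt A
instance (A : String) (out : String × String) : Decidable (Spec_generate_U_L A out) := by unfold Spec_generate_U_L; infer_instance

-- ===== CLAIM (what is proved, stated in full; the proofs are below) =====
def Claim_equal_generate_U_L : Prop := ∀ (A : String), Dom_generate_U_L A → Spec_generate_U_L A (generate_U_L A)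

-- ===== LEMMAS AND PROOFS =====

-- Common characterisation: right-to-left recursion producing (U, L).
def pvGo : List Char → List Char × List Char
  | [] => ([], [])
  | c :: cs =>
    let r := pvGo cs
    if c = '1' then ('1' :: r.2, '0' :: r.1) else ('0' :: r.1, '0' :: r.2)

-- A's foldl, from any start state, appends pvGo (with streams swapped when the flag is set).
theorem pvA_loop (cs : List Char) : ∀ (U L : List Char) (fl : Bool),
    ∃ fl', cs.foldl pvAStep (U, L, fl) =
      (U ++ (if fl then (pvGo cs).2 else (pvGo cs).1),
       L ++ (if fl then (pvGo cs).1 else (pvGo cs).2), fl') := by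
  induction cs with
  | nil => intro U L fl; exact ⟨fl, by simp [pvGo]⟩
  | cons c cs ih =>
    intro U L fl
    by_cases hc : c = '1'
    · cases fl with
      | false =>
        obtain ⟨fl', h⟩ := ih (U ++ ['1']) (L ++ ['0']) true
        exact ⟨fl', by simp [List.foldl_cons, pvAStep, hc, h, pvGo]⟩
      | true =>
        obtain ⟨fl', h⟩ := ih (U ++ ['0']) (L ++ ['1']) false
        exact ⟨fl', by simp [List.foldl_cons, pvAStep, hc, h, pvGo]⟩
    · obtain ⟨fl', h⟩ := ih (U ++ ['0']) (L ++ ['0']) fl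
      refine ⟨fl', ?_⟩
      cases fl <;> simp [List.foldl_cons, pvAStep, hc, h, pvGo]

-- '1'-indices of cs when enumeration starts at s (pvOnes cs = pvE 0 cs by definition).
def pvE (s : Int) (cs : List Char) : List Int :=
  ((PySem.List.enumerate cs s).filter (fun p => p.2 == '1')).map Prod.fst

theorem pvE_cons (s : Int) (c : Char) (cs : List Char) :
    pvE s (c :: cs) = if c = '1' then s :: pvE (s + 1) cs else pvE (s + 1) cs := by
  by_cases hc : c = '1' <;>
    simp [pvE, PySem.List.enumerate_cons, hc]

theorem everyOther_cons (a : Int) (t : List Int) :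
    pvEveryOther (a :: t) = a :: pvEveryOther t.tail := by
  cases t <;> rfl

theorem mem_everyOther {x : Int} : ∀ {l : List Int}, x ∈ pvEveryOther l → x ∈ l := by
  intro l
  induction l using pvEveryOther.induct with
  | case1 => simp [pvEveryOther]
  | case2 a => simp [pvEveryOther]
  | case3 a b rest ih =>
    intro h
    rcases List.mem_cons.mp h with h | h
    · simp [h]
    · simp [List.mem_cons, ih h]

theorem mem_pvE_ge {x : Int} : ∀ (cs : List Char) (s : Int), x ∈ pvE s cs → s ≤ x := by
  intro cs
  induction cs with
  | nil => intro s h; simp [pvE] at h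
  | cons c cs ih =>
    intro s h
    rw [pvE_cons] at h
    by_cases hc : c = '1'
    · simp [hc] at h
      rcases h with h | h
      · omega
      · have := ih (s + 1) h; omega
    · simp [hc] at h
      have := ih (s + 1) h; omega

-- Main B-characterisation: the two painted strings are exactly pvGo.
theorem pvB_char (cs : List Char) : ∀ (s : Int),
    ((PySem.List.pyRange s (s + cs.length) 1).map
        (fun i => if i ∈ pvEveryOther (pvE s cs) then '1' else '0') = (pvGo cs).1)
  ∧ ((PySem.List.pyRange s (s + cs.length) 1).map
        (fun i => if i ∈ pvEveryOther (pvE s cs).tail then '1' else '0') = (pvGo cs).2) := by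
  induction cs with
  | nil =>
    intro s
    constructor <;> simp [pvGo]
  | cons c cs ih =>
    intro s
    have hstop : s + (((c :: cs).length : Nat) : Int) = s + 1 + (cs.length : Int) := by
      simp only [List.length_cons]; push_cast; ring
    have hlen : s < s + 1 + (cs.length : Int) := by
      have : (0 : Int) ≤ (cs.length : Int) := Int.natCast_nonneg _
      omega
    have hrange : PySem.List.pyRange s (s + (((c :: cs).length : Nat) : Int)) 1
        = s :: PySem.List.pyRange (s + 1) (s + 1 + (cs.length : Int)) 1 := by
      rw [hstop, PySem.List.pyRange_one_cons hlen]
    by_cases hc : c = '1'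
    · -- pvE s = s :: pvE (s+1); evens = s :: odds(s+1), odds = evens(s+1)
      have hE : pvE s (c :: cs) = s :: pvE (s + 1) cs := by rw [pvE_cons]; simp [hc]
      have hEv : pvEveryOther (pvE s (c :: cs)) = s :: pvEveryOther (pvE (s + 1) cs).tail := by
        rw [hE, everyOther_cons]
      constructor
      · rw [hrange, List.map_cons, hEv]
        have hhead : (if s ∈ (s :: pvEveryOther (pvE (s + 1) cs).tail) then '1' else '0') = '1' := by
          simp
        rw [hhead]
        have hmap : (PySem.List.pyRange (s + 1) (s + 1 + (cs.length : Int)) 1).map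
            (fun i => if i ∈ (s :: pvEveryOther (pvE (s + 1) cs).tail) then '1' else '0')
            = (PySem.List.pyRange (s + 1) (s + 1 + (cs.length : Int)) 1).map
            (fun i => if i ∈ pvEveryOther (pvE (s + 1) cs).tail then '1' else '0') := by
          apply List.map_congr_left
          intro i hi
          have hge : s + 1 ≤ i := by
            have := (PySem.List.mem_pyRange_one).mp hi
            omega
          have : i ≠ s := by omega
          simp [List.mem_cons, this]
        rw [hmap, (ih (s + 1)).2]
        simp [pvGo, hc]
      · rw [hrange, List.map_cons, hE]
        have hhead : (if s ∈ (pvEveryOther (s :: pvE (s + 1) cs).tail) then '1' else '0') = '0' := by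
          have : s ∉ pvEveryOther (pvE (s + 1) cs) := by
            intro hmem
            have := mem_pvE_ge cs (s + 1) (mem_everyOther hmem)
            omega
          simp [this]
        rw [hhead]
        have : (s :: pvE (s + 1) cs).tail = pvE (s + 1) cs := rfl
        rw [this, (ih (s + 1)).1]
        simp [pvGo, hc]
    · have hE : pvE s (c :: cs) = pvE (s + 1) cs := by rw [pvE_cons]; simp [hc]
      have hb1 : s ∉ pvEveryOther (pvE (s + 1) cs) := by
        intro hmem
        have := mem_pvE_ge cs (s + 1) (mem_everyOther hmem); omega
      have hb2 : s ∉ pvEveryOther (pvE (s + 1) cs).tail := by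
        intro hmem
        have h1 := mem_everyOther hmem
        have h2 : (pvE (s + 1) cs).tail.Sublist (pvE (s + 1) cs) := List.tail_sublist _
        have := mem_pvE_ge cs (s + 1) (h2.mem h1); omega
      constructor
      · rw [hrange, List.map_cons, hE]
        rw [if_neg hb1, (ih (s + 1)).1]
        simp [pvGo, hc]
      · rw [hrange, List.map_cons, hE]
        rw [if_neg hb2, (ih (s + 1)).2]
        simp [pvGo, hc]

-- ===== VERDICT (by name: the statement is the Claim_ definition above) =====
theorem generate_U_L_spec : Claim_equal_generate_U_L := by
  intro A _
  unfold Spec_generate_U_L generate_U_L generate_U_L_alt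
  obtain ⟨fl', h⟩ := pvA_loop A.toList [] [] false
  rw [h]
  have hlen : PySem.Str.len A = ((A.toList.length : Nat) : Int) := by
    simp [PySem.Str.len_eq]
  have h1 : (PySem.List.pyRange 0 (0 + (A.toList.length : Int)) 1).map
      (fun i => if i ∈ pvEveryOther (pvOnes A.toList) then '1' else '0') = (pvGo A.toList).1 :=
    (pvB_char A.toList 0).1
  have h2 : (PySem.List.pyRange 0 (0 + (A.toList.length : Int)) 1).map
      (fun i => if i ∈ pvEveryOther (pvOnes A.toList).tail then '1' else '0') = (pvGo A.toList).2 :=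
    (pvB_char A.toList 0).2
  rw [zero_add] at h1 h2
  simp only [hlen, h1, h2]
  simp
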